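-- pv_equiv track=rewrite | github.com/MrBrantCode/unitest_baseline | mut_generate/mist_train_cf/cf_30760/solution.py | capitalize_vowels
-- ===== SOURCE A (Python) =====
-- def capitalize_vowels(input_str: str) -> str:
--     vowels = "aeiou"
--     modified_str = ''
--     for char in input_str:
--         if char.lower() in vowels:
--             modified_str += char.upper()
--         else:
--             modified_str += char
--     return modified_str
-- ===== SOURCE B (Python) =====
-- _VOWEL_TABLE = str.maketrans("aeiouAEIOU", "AEIOUAEIOU")
--
-- def capitalize_vowels(input_str: str) -> str:
--     return input_str.translate(_VOWEL_TABLE)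
-- ===== Notes on version B (the rewrite author's own statement) =====
-- stated objective: idiomatic
-- what changed: Replaces the explicit per-character loop with a lower()/membership test and string concatenation by a precomputed str.maketrans translation table applied in one translate() call.
import Mathlib
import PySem

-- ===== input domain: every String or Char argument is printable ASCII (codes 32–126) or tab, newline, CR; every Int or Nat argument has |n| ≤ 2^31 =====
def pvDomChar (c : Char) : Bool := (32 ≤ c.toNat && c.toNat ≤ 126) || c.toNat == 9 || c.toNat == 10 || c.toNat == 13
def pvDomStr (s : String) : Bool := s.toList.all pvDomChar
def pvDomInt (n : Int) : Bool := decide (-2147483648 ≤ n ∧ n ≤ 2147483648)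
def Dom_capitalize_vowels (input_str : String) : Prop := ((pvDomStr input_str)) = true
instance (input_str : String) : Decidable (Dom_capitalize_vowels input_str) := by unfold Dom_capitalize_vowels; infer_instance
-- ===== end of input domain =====

-- B replaces A's per-character conditional accumulation with a precomputed vowel→uppercase
-- translation table (str.maketrans) applied in a single translate() pass (idiomatic).


-- ===== PORT A =====
-- loop: modified_str += (upper char) when char.lower() is in "aeiou", else the char itself.
-- 'char.lower() in vowels' on a single character is exactly list membership in "aeiou".toList.
def capitalize_vowels (input_str : String) : String :=
  let vowels := "aeiou"
  String.mk (input_str.toList.foldl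
    (fun acc c =>
      if PySem.Chars.lowerChar c ∈ vowels.toList then acc ++ [PySem.Chars.upperChar c]
      else acc ++ [c]) [])

-- ===== PORT B =====
-- the translation table of str.maketrans("aeiouAEIOU", "AEIOUAEIOU"): a dict built from the zip
def cvTable : PySem.Dict Char Char :=
  ("aeiouAEIOU".toList.zip "AEIOUAEIOU".toList).foldl
    (fun d p => d.insert p.1 p.2) PySem.Dict.empty

-- str.translate: each character is replaced by its table entry, or kept when unmapped
def capitalize_vowels_alt (input_str : String) : String :=
  String.mk (input_str.toList.map (fun c => cvTable.getD c c))

-- ===== PRECONDITION & SPEC =====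
def Spec_capitalize_vowels (input_str : String) (out : String) : Prop := out = capitalize_vowels_alt input_str
instance (input_str : String) (out : String) : Decidable (Spec_capitalize_vowels input_str out) := by unfold Spec_capitalize_vowels; infer_instance

-- ===== CLAIM (what is proved, stated in full; the proofs are below) =====
def Claim_equal_capitalize_vowels : Prop := ∀ (input_str : String), Dom_capitalize_vowels input_str → Spec_capitalize_vowels input_str (capitalize_vowels input_str)

-- ===== LEMMAS AND PROOFS =====

-- A's step function, factored: the character A appends for c
def cvStep (c : Char) : Char :=
  if PySem.Chars.lowerChar c ∈ "aeiou".toList then PySem.Chars.upperChar c else c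

-- A's accumulation is a map with cvStep
lemma cv_foldl_eq_map (l : List Char) (acc : List Char) :
    l.foldl (fun acc c =>
      if PySem.Chars.lowerChar c ∈ "aeiou".toList then acc ++ [PySem.Chars.upperChar c]
      else acc ++ [c]) acc = acc ++ l.map cvStep := by
  induction l generalizing acc with
  | nil => simp
  | cons c t ih =>
    simp only [List.foldl_cons, List.map_cons, ih, cvStep]
    split <;> simp

-- a character not among the ten vowels has a non-vowel lower-case form
lemma lowerChar_not_vowel (c : Char)
    (h : c ∉ ['a','e','i','o','u','A','E','I','O','U']) :
    PySem.Chars.lowerChar c ∉ "aeiou".toList := by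
  have hl : ("aeiou".toList) = ['a','e','i','o','u'] := by decide
  rw [hl]
  simp only [List.mem_cons, List.not_mem_nil, or_false, not_or] at h ⊢
  obtain ⟨h1,h2,h3,h4,h5,h6,h7,h8,h9,h10⟩ := h
  simp only [PySem.Chars.lowerChar, PySem.Chars.isupper]
  split
  · rename_i hu
    simp only [decide_eq_true_eq, Bool.and_eq_true] at hu
    have hz : c.toNat ≤ 90 := hu.2
    have hval : (Char.ofNat (c.toNat + 32)).toNat = c.toNat + 32 := by
      rw [Char.toNat_ofNat, if_pos (Or.inl (by omega))]
    have key : ∀ d : Char, Char.ofNat (c.toNat + 32) = d → c.toNat = d.toNat - 32 := by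
      intro d hd
      have := congrArg Char.toNat hd
      rw [hval] at this
      omega
    refine ⟨fun hd => h6 ?_, fun hd => h7 ?_, fun hd => h8 ?_, fun hd => h9 ?_,
      fun hd => h10 ?_⟩
    all_goals
      rw [← Char.ofNat_toNat c, key _ hd]
      decide
  · exact ⟨h1, h2, h3, h4, h5⟩

-- the concrete entries of the table (evaluates the foldl of inserts once)
lemma cvTable_items : cvTable.items =
    [('a','A'),('e','E'),('i','I'),('o','O'),('u','U'),
     ('A','A'),('E','E'),('I','I'),('O','O'),('U','U')] := by decide

lemma cvTable_getD_of_not_vowel (c : Char)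
    (h : c ∉ ['a','e','i','o','u','A','E','I','O','U']) :
    cvTable.getD c c = c := by
  simp only [List.mem_cons, List.not_mem_nil, or_false, not_or] at h
  obtain ⟨h1,h2,h3,h4,h5,h6,h7,h8,h9,h10⟩ := h
  have e : ∀ a : Char, ¬ c = a → (a == c) = false :=
    fun a ha => beq_eq_false_iff_ne.mpr (fun hac => ha hac.symm)
  simp [PySem.Dict.getD, PySem.Dict.get?, cvTable_items, List.find?,
    e _ h1, e _ h2, e _ h3, e _ h4, e _ h5, e _ h6, e _ h7, e _ h8, e _ h9, e _ h10]

-- per character, A's step agrees with B's table lookup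
lemma cvStep_eq_lookup (c : Char) : cvStep c = cvTable.getD c c := by
  by_cases h : c ∈ ['a','e','i','o','u','A','E','I','O','U']
  · fin_cases h <;> decide
  · rw [cvTable_getD_of_not_vowel c h, cvStep, if_neg (lowerChar_not_vowel c h)]

-- ===== VERDICT (by name: the statement is the Claim_ definition above) =====
theorem capitalize_vowels_spec : Claim_equal_capitalize_vowels := by
  intro s _
  unfold Spec_capitalize_vowels capitalize_vowels capitalize_vowels_alt
  show String.mk (s.toList.foldl
      (fun acc c =>
        if PySem.Chars.lowerChar c ∈ "aeiou".toList then acc ++ [PySem.Chars.upperChar c]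
        else acc ++ [c]) []) = _
  rw [cv_foldl_eq_map]
  simp only [List.nil_append]
  congr 1
  exact List.map_congr_left (fun c _ => cvStep_eq_lookup c)
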